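-- pv_equiv track=rewrite | github.com/derezed88/llmem-gw | prompt.py | _parse_main_prompt
-- ===== SOURCE A (Python) =====
-- from typing import List, Dict, Optional, Tuple, Set
--
-- def _parse_main_prompt(content: str) -> Tuple[str, List[Tuple[str, str]]]:
--     """
--     Parse main .system_prompt file into:
--     - main_paragraph (before [SECTIONS])
--     - section_list [(short-name, description), ...]
--     """
--     lines = content.split('\n')
--     sections_idx = -1
--     for i, line in enumerate(lines):
--         if line.strip() == '[SECTIONS]':
--             sections_idx = i
--             break
--
--     if sections_idx == -1:
--         return content.strip(), []
--
--     main_paragraph = '\n'.join(lines[:sections_idx]).strip()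
--     section_list = []
--     for line in lines[sections_idx + 1:]:
--         line = line.strip()
--         if not line:
--             continue
--         if ':' in line:
--             parts = line.split(':', 1)
--             short_name = parts[0].strip()
--             description = parts[1].strip()
--             section_list.append((short_name, description))
--
--     return main_paragraph, section_list
-- ===== SOURCE B (Python) =====
-- def _parse_main_prompt(content):
--     """Single fused pass over the lines with an in_sections flag,
--     instead of A's find-index-then-two-slice-loops decomposition."""
--     in_sections = False
--     main_lines = []
--     section_list = []
--     for line in content.split('\n'):
--         if not in_sections:
--             if line.strip() == '[SECTIONS]':
--                 in_sections = True
--             else: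
--                 main_lines.append(line)
--         else:
--             s = line.strip()
--             if s and ':' in s:
--                 name, desc = s.split(':', 1)
--                 section_list.append((name.strip(), desc.strip()))
--     if not in_sections:
--         return content.strip(), []
--     return '\n'.join(main_lines).strip(), section_list
-- ===== Notes on version B (the rewrite author's own statement) =====
-- stated objective: simpler
-- what changed: Replaces A's three passes (enumerate to find the [SECTIONS] index, then two slice-based passes) by one fused pass over the lines with an in_sections flag and two accumulators.
import Mathlib
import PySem

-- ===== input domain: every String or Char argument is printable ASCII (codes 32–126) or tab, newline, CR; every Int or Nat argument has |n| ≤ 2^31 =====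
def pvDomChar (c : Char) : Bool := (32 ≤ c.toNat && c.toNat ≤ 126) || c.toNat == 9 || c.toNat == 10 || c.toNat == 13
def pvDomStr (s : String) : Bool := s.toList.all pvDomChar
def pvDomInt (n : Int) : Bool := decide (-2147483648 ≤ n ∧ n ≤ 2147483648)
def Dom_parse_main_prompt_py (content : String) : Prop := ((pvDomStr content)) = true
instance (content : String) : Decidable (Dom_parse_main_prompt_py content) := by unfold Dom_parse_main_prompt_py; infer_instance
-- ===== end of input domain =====

-- B replaces A's find-index-then-two-slice-loops decomposition by one fused pass with a flag (simpler; same cost).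
-- ===== PORT A =====
-- 'for i, line in enumerate(lines): if line.strip() == "[SECTIONS]": sections_idx = i; break'
def aFindIdx : List String → Int → Int
  | [], _ => -1
  | l :: rest, i => if PySem.Str.strip l = "[SECTIONS]" then i else aFindIdx rest (i + 1)

-- the second loop of A, over lines[sections_idx+1:]
def aSections : List String → List (String × String)
  | [] => []
  | l :: rest =>
    let s := PySem.Str.strip l
    if s = "" then aSections rest
    else if PySem.Str.isIn ":" s then
      match PySem.Str.splitMax? s ":" 1 with
      | some (p0 :: p1 :: _) => (PySem.Str.strip p0, PySem.Str.strip p1) :: aSections rest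
      | _ => aSections rest  -- unreachable: ':' in s guarantees two parts
    else aSections rest

def parse_main_prompt_py (content : String) : String × (List (String × String)) :=
  let lines := (PySem.Str.split? content "\n").getD []
  let sections_idx := aFindIdx lines 0
  if sections_idx = -1 then (PySem.Str.strip content, [])
  else
    let main_paragraph :=
      PySem.Str.strip (PySem.Str.join "\n" (PySem.List.slice lines none (some sections_idx)))
    (main_paragraph, aSections (PySem.List.slice lines (some (sections_idx + 1)) none))

-- ===== PORT B =====
-- one pass: state = (in_sections, main_lines, section_list)
def bLoop : List String → Bool → List String → List (String × String) →
    Bool × List String × List (String × String)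
  | [], ins, ml, sl => (ins, ml, sl)
  | l :: rest, ins, ml, sl =>
    if ins then
      let s := PySem.Str.strip l
      if s ≠ "" ∧ PySem.Str.isIn ":" s then
        match PySem.Str.splitMax? s ":" 1 with
        | some (p0 :: p1 :: _) =>
            bLoop rest true ml (sl ++ [(PySem.Str.strip p0, PySem.Str.strip p1)])
        | _ => bLoop rest true ml sl  -- unreachable: ':' in s guarantees two parts
      else bLoop rest true ml sl
    else if PySem.Str.strip l = "[SECTIONS]" then bLoop rest true ml sl
    else bLoop rest false (ml ++ [l]) sl

def parse_main_prompt_py_alt (content : String) : String × (List (String × String)) :=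
  match bLoop ((PySem.Str.split? content "\n").getD []) false [] [] with
  | (false, _, _) => (PySem.Str.strip content, [])
  | (true, ml, sl) => (PySem.Str.strip (PySem.Str.join "\n" ml), sl)

-- ===== PRECONDITION & SPEC =====
def Spec_parse_main_prompt_py (content : String) (out : String × (List (String × String))) : Prop := out = parse_main_prompt_py_alt content
instance (content : String) (out : String × (List (String × String))) : Decidable (Spec_parse_main_prompt_py content out) := by unfold Spec_parse_main_prompt_py; infer_instance

-- ===== CLAIM (what is proved, stated in full; the proofs are below) =====
def Claim_equal_parse_main_prompt_py : Prop := ∀ (content : String), Dom_parse_main_prompt_py content → Spec_parse_main_prompt_py content (parse_main_prompt_py content)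

-- ===== LEMMAS AND PROOFS =====

-- section phase: B's flagged loop appends exactly A's second-loop output
theorem bLoop_true (rest : List String) : ∀ (ml : List String) (sl : List (String × String)),
    bLoop rest true ml sl = (true, ml, sl ++ aSections rest) := by
  induction rest with
  | nil => intro ml sl; simp [bLoop, aSections]
  | cons l rest ih =>
    intro ml sl
    simp only [bLoop, aSections]
    by_cases h0 : PySem.Str.strip l = ""
    · simp [h0, ih]
    · by_cases h1 : PySem.Chars.isIn [':'] (PySem.Chars.strip l.toList) = true
      · cases hsp : PySem.Str.splitMax? (PySem.Str.strip l) ":" 1 with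
        | none => simp [h0, h1, ih]
        | some parts =>
          match parts with
          | [] => simp [h0, h1, ih]
          | [p] => simp [h0, h1, ih]
          | p0 :: p1 :: t =>
            simp [h0, h1, ih]
      · simp [h0, h1, ih]

-- pre phase: B's loop vs. the first marker index
theorem bLoop_false (lines : List String) : ∀ (acc : List String),
    bLoop lines false acc [] =
      match lines.findIdx? (fun l => PySem.Str.strip l = "[SECTIONS]") with
      | none => (false, acc ++ lines, [])
      | some k => (true, acc ++ lines.take k, aSections (lines.drop (k + 1))) := by
  induction lines with
  | nil => intro acc; simp [bLoop]
  | cons l rest ih =>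
    intro acc
    by_cases h : PySem.Str.strip l = "[SECTIONS]"
    · simp [bLoop, h, List.findIdx?_cons, bLoop_true]
    · simp only [bLoop, h, if_false, List.findIdx?_cons, decide_eq_true_eq]
      rw [ih]
      cases hf : rest.findIdx? (fun l => PySem.Str.strip l = "[SECTIONS]") with
      | none => simp
      | some k => simp [List.take_succ_cons]

-- A's index loop vs. findIdx?
theorem aFindIdx_eq (lines : List String) : ∀ (i : Int),
    aFindIdx lines i =
      match lines.findIdx? (fun l => PySem.Str.strip l = "[SECTIONS]") with
      | none => -1
      | some k => i + k := by
  induction lines with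
  | nil => intro i; simp [aFindIdx]
  | cons l rest ih =>
    intro i
    by_cases h : PySem.Str.strip l = "[SECTIONS]"
    · simp [aFindIdx, h, List.findIdx?_cons]
    · simp only [aFindIdx, h, if_false, List.findIdx?_cons, decide_eq_true_eq]
      rw [ih]
      cases hf : rest.findIdx? (fun l => PySem.Str.strip l = "[SECTIONS]") with
      | none => simp
      | some k => simp; ring

-- ===== VERDICT (by name: the statement is the Claim_ definition above) =====
theorem parse_main_prompt_py_spec : Claim_equal_parse_main_prompt_py := by
  intro content _
  unfold Spec_parse_main_prompt_py parse_main_prompt_py parse_main_prompt_py_alt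
  dsimp only
  rw [bLoop_false, aFindIdx_eq]
  cases hf : ((PySem.Str.split? content "\n").getD []).findIdx?
      (fun l => PySem.Str.strip l = "[SECTIONS]") with
  | none => simp
  | some k =>
    have hk : ¬ ((0 : Int) + (k : Int) = -1) := by omega
    rw [if_neg hk]
    have h1 : PySem.List.slice ((PySem.Str.split? content "\n").getD []) none (some ((0 : Int) + (k : Int)))
        = ((PySem.Str.split? content "\n").getD []).take k := by
      rw [zero_add]; exact PySem.List.slice_to_natCast _ _
    have h2 : PySem.List.slice ((PySem.Str.split? content "\n").getD []) (some ((0 : Int) + (k : Int) + 1)) none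
        = ((PySem.Str.split? content "\n").getD []).drop (k + 1) := by
      have : (0 : Int) + (k : Int) + 1 = ((k + 1 : Nat) : Int) := by push_cast; ring
      rw [this]; exact PySem.List.slice_from_natCast _ _
    rw [h1, h2]; simp
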